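-- pv_equiv track=rewrite | github.com/PopaBogdan498/LFA_assignment3 | tasks/cfg_task5.py | is_in_abc_language
-- ===== SOURCE A (Python) =====
-- def is_in_abc_language(s):
--     n = len(s)
--     if n < 3:
--         return False
--     i = 0
--     while i < n and s[i] == 'a':
--         i += 1
--     j = i
--     while j < n and s[j] == 'b':
--         j += 1
--     k = j
--     while k < n and s[k] == 'c':
--         k += 1
--     # Toate caracterele trebuie să fie consumate și numărul de a, b, c să fie egal și >= 1
--     if i > 0 and (i == (j - i)) and (i == (k - j)) and k == n:
--         return True
--     return False
-- ===== SOURCE B (Python) =====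
-- def is_in_abc_language(s):
--     n = len(s)
--     if n < 3 or n % 3 != 0:
--         return False
--     m = n // 3
--     return s == 'a' * m + 'b' * m + 'c' * m
-- ===== Notes on version B (the rewrite author's own statement) =====
-- stated objective: simpler
-- what changed: Replaces the three index-walking while-loops and boundary arithmetic with a closed-form reconstruction: check n % 3 == 0 (and n >= 3) and compare s with the canonical string 'a'*m+'b'*m+'c'*m.
import Mathlib
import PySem

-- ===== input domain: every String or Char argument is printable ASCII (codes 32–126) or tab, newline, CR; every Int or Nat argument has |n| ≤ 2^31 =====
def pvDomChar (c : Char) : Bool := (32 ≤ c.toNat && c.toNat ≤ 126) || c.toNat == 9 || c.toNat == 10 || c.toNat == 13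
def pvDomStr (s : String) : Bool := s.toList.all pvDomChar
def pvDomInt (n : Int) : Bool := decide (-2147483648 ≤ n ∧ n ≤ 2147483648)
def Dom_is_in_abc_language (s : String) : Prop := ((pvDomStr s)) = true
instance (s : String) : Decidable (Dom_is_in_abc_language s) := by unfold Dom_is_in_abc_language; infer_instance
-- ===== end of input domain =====

-- B replaces A's three index-walking while-loops with a closed-form check:
-- n % 3 = 0 (and n ≥ 3) and s equals the canonical 'a'*m+'b'*m+'c'*m. Objective: simpler.

-- ===== PORT A =====
-- one while-loop 'while i < n and s[i] == ch: i += 1', indices as Nat (A's ints stay ≥ 0)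
def pvWhile (l : List Char) (ch : Char) (n i : Nat) : Nat :=
  if i < n ∧ l[i]? = some ch then pvWhile l ch n (i + 1) else i
termination_by n - i
decreasing_by omega

def is_in_abc_language (s : String) : Bool :=
  let l := s.toList
  let n := l.length
  if n < 3 then false
  else
    let i := pvWhile l 'a' n 0
    let j := pvWhile l 'b' n i
    let k := pvWhile l 'c' n j
    if 0 < i ∧ i = j - i ∧ i = k - j ∧ k = n then true else false

-- ===== PORT B =====
def is_in_abc_language_alt (s : String) : Bool :=
  let l := s.toList
  let n := l.length
  if n < 3 ∨ n % 3 ≠ 0 then false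
  else
    let m := n / 3
    l = List.replicate m 'a' ++ List.replicate m 'b' ++ List.replicate m 'c'

-- ===== PRECONDITION & SPEC =====
def Spec_is_in_abc_language (s : String) (out : Bool) : Prop := out = is_in_abc_language_alt s
instance (s : String) (out : Bool) : Decidable (Spec_is_in_abc_language s out) := by unfold Spec_is_in_abc_language; infer_instance

-- ===== CLAIM (what is proved, stated in full; the proofs are below) =====
def Claim_equal_is_in_abc_language : Prop := ∀ (s : String), Dom_is_in_abc_language s → Spec_is_in_abc_language s (is_in_abc_language s)

-- ===== LEMMAS AND PROOFS =====

-- invariant of the while loop: it returns the first index ≥ i whose char differs from ch (or n)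
theorem pvWhile_spec (l : List Char) (ch : Char) (i : Nat) (hi : i ≤ l.length) :
    i ≤ pvWhile l ch l.length i ∧ pvWhile l ch l.length i ≤ l.length ∧
    (∀ t, i ≤ t → t < pvWhile l ch l.length i → l[t]? = some ch) ∧
    (pvWhile l ch l.length i < l.length → l[pvWhile l ch l.length i]? ≠ some ch) := by
  generalize hd : l.length - i = d
  induction d generalizing i with
  | zero =>
    rw [pvWhile, if_neg (fun hcond => absurd hcond.1 (by omega))]
    exact ⟨le_refl _, hi, fun t h1 h2 => by omega, fun h hc => by omega⟩
  | succ d ih =>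
    rw [pvWhile]
    by_cases h : i < l.length ∧ l[i]? = some ch
    · rw [if_pos h]
      have this := ih (i + 1) (by omega) (by omega)
      refine ⟨by omega, this.2.1, ?_, this.2.2.2⟩
      intro t ht1 ht2
      rcases Nat.eq_or_lt_of_le ht1 with rfl | hlt
      · exact h.2
      · exact this.2.2.1 t (by omega) ht2
    · rw [if_neg h]
      exact ⟨le_refl _, hi, fun t h1 h2 => by omega, fun hlt hch => h ⟨hlt, hch⟩⟩

-- indexing into the canonical word
theorem canon_getElem? (m t : Nat) :
    (List.replicate m 'a' ++ List.replicate m 'b' ++ List.replicate m 'c')[t]? =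
      if t < m then some 'a' else if t < 2 * m then some 'b'
      else if t < 3 * m then some 'c' else none := by
  by_cases h1 : t < m
  · rw [List.getElem?_append_left (by simp [List.length_append]; omega)]
    rw [List.getElem?_append_left (by simpa using h1)]
    simp [h1]
  · by_cases h2 : t < 2 * m
    · rw [List.getElem?_append_left (by simp [List.length_append]; omega)]
      rw [List.getElem?_append_right (by simpa using by omega)]
      simp only [List.length_replicate, List.getElem?_replicate]
      rw [if_neg h1, if_pos h2, if_pos (by omega)]
    · by_cases h3 : t < 3 * m
      · rw [List.getElem?_append_right (by simp [List.length_append]; omega)]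
        simp only [List.length_append, List.length_replicate, List.getElem?_replicate]
        rw [if_neg h1, if_neg h2, if_pos h3, if_pos (by omega)]
      · rw [List.getElem?_eq_none (by simp [List.length_append]; omega)]
        rw [if_neg h1, if_neg h2, if_neg h3]

-- characterize pvWhile on a list known pointwise
theorem pvWhile_eq_of_pointwise (l : List Char) (ch : Char) (i j : Nat)
    (hij : i ≤ j) (hj : j ≤ l.length)
    (hall : ∀ t, i ≤ t → t < j → l[t]? = some ch)
    (hstop : j < l.length → l[j]? ≠ some ch) :
    pvWhile l ch l.length i = j := by
  obtain ⟨h1, h2, h3, h4⟩ := pvWhile_spec l ch i (by omega)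
  set w := pvWhile l ch l.length i with hw
  rcases Nat.lt_trichotomy w j with hlt | heq | hgt
  · exact absurd (hall w h1 hlt) (h4 (by omega))
  · exact heq
  · exact absurd (h3 j hij hgt) (hstop (by omega))

theorem is_in_abc_eq (s : String) : is_in_abc_language s = is_in_abc_language_alt s := by
  unfold is_in_abc_language is_in_abc_language_alt
  dsimp only
  set l := s.toList with hl
  by_cases hn3 : l.length < 3
  · rw [if_pos hn3, if_pos (Or.inl hn3)]
  · rw [if_neg hn3]
    obtain ⟨hi1, hi2, hi3, hi4⟩ := pvWhile_spec l 'a' 0 (by omega)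
    set i := pvWhile l 'a' l.length 0 with hidef
    obtain ⟨hj1, hj2, hj3, hj4⟩ := pvWhile_spec l 'b' i hi2
    set j := pvWhile l 'b' l.length i with hjdef
    obtain ⟨hk1, hk2, hk3, hk4⟩ := pvWhile_spec l 'c' j hj2
    set k := pvWhile l 'c' l.length j with hkdef
    by_cases hA : 0 < i ∧ i = j - i ∧ i = k - j ∧ k = l.length
    · -- A returns true: l is the canonical word with m = i
      obtain ⟨ha, hb, hc, hd⟩ := hA
      have hji : j = 2 * i := by omega
      have hki : k = 3 * i := by omega
      have hmod : ¬ (l.length < 3 ∨ l.length % 3 ≠ 0) := by omega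
      have hm : l.length / 3 = i := by omega
      have hcanon : l = List.replicate (l.length / 3) 'a' ++
          List.replicate (l.length / 3) 'b' ++ List.replicate (l.length / 3) 'c' := by
        rw [hm]
        apply List.ext_getElem?
        intro t
        rw [canon_getElem?]
        by_cases h1 : t < i
        · rw [if_pos h1]; exact hi3 t (by omega) h1
        · by_cases h2 : t < 2 * i
          · rw [if_neg h1, if_pos h2]; exact hj3 t (by omega) (by omega)
          · by_cases h3 : t < 3 * i
            · rw [if_neg h1, if_neg h2, if_pos h3]; exact hk3 t (by omega) (by omega)
            · rw [if_neg h1, if_neg h2, if_neg h3]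
              exact List.getElem?_eq_none (by omega)
      rw [if_pos ⟨ha, hb, hc, hd⟩, if_neg hmod]
      exact (decide_eq_true hcanon).symm
    · -- A returns false: show B is false too
      rw [if_neg hA]
      by_cases hmod : l.length < 3 ∨ l.length % 3 ≠ 0
      · rw [if_pos hmod]
      · rw [if_neg hmod]
        symm
        rw [decide_eq_false_iff_not]
        intro hcanon
        set m := l.length / 3 with hm
        have hmn : 3 * m = l.length := by omega
        have hget : ∀ t : Nat, l[t]? =
            (if t < m then some 'a' else if t < 2 * m then some 'b'
             else if t < 3 * m then some 'c' else none) := by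
          intro t
          conv_lhs => rw [hcanon]
          rw [canon_getElem?]
        have him : i = m := by
          rw [hidef]
          apply pvWhile_eq_of_pointwise l 'a' 0 m (by omega) (by omega)
          · intro t _ ht; rw [hget t, if_pos ht]
          · intro hlt
            rw [hget m, if_neg (by omega), if_pos (by omega)]
            simp
        have hjm : j = 2 * m := by
          rw [hjdef, him]
          apply pvWhile_eq_of_pointwise l 'b' m (2 * m) (by omega) (by omega)
          · intro t ht1 ht2; rw [hget t, if_neg (by omega), if_pos ht2]
          · intro hlt
            rw [hget (2 * m), if_neg (by omega), if_neg (by omega), if_pos (by omega)]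
            simp
        have hkm : k = 3 * m := by
          rw [hkdef, hjm]
          apply pvWhile_eq_of_pointwise l 'c' (2 * m) (3 * m) (by omega) (by omega)
          · intro t ht1 ht2
            rw [hget t, if_neg (by omega), if_neg (by omega), if_pos ht2]
          · intro hlt; omega
        exact hA ⟨by omega, by omega, by omega, by omega⟩

-- ===== VERDICT (by name: the statement is the Claim_ definition above) =====
theorem is_in_abc_language_spec : Claim_equal_is_in_abc_language := by
  intro s _
  unfold Spec_is_in_abc_language
  exact is_in_abc_eq s
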